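-- pv_equiv track=rewrite | github.com/dimamik/AGH_Algorithms_and_data_structures | LATO_FOR_EXAM/Hackerrank/Greedy/Beautiful_Pairs.py | beautifulPairs
-- ===== SOURCE A (Python) =====
-- def beautifulPairs(A, B):
--     H = {}
--     for i in range(len(A)):
--         if str(A[i]) not in H:
--             H[str(A[i])] = 1
--         else:
--             H[str(A[i])]+=1
--     k = len(H)
--     c=0
--     to_add = -1
--     for i in range(len(B)):
--         if str(B[i]) in H and H[(str(B[i]))]!=0:
--             H[(str(B[i]))] -=1
--             c+=1
--         else:
--             to_add=1
--     return (c+to_add)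
-- ===== SOURCE B (Python) =====
-- def beautifulPairs(A, B):
--     ca = {}
--     for x in A:
--         s = str(x)
--         ca[s] = ca.get(s, 0) + 1
--     cb = {}
--     for y in B:
--         s = str(y)
--         cb[s] = cb.get(s, 0) + 1
--     matches = sum(min(v, cb.get(k, 0)) for k, v in ca.items())
--     return matches - 1 if matches == len(B) else matches + 1
-- ===== Notes on version B (the rewrite author's own statement) =====
-- stated objective: simpler
-- what changed: B replaces A's greedy decrement loop over B (mutating the counter and tracking a failure flag) by two counting passes and a closed-form multiset-intersection size, returning matches-1 when matches == len(B) and matches+1 otherwise.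
import Mathlib
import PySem

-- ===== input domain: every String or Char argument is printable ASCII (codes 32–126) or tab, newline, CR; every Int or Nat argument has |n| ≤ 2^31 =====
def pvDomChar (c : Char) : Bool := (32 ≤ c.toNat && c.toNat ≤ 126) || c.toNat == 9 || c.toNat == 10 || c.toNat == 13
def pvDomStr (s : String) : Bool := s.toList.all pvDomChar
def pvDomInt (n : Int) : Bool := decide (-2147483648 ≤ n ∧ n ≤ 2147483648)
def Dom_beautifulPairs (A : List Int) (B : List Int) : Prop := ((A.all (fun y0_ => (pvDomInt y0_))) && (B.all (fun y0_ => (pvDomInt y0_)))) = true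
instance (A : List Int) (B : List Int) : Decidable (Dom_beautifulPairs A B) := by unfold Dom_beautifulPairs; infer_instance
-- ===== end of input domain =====

-- B replaces A's greedy decrement loop over B with a closed-form multiset-intersection count plus ±1; equivalence is proved on all inputs (A is total).

-- ===== PORT A =====
def beautifulPairs (A : List Int) (B : List Int) : Int :=
  let H : PySem.Dict String Int := A.foldl (fun H a =>
      if H.contains (PySem.Int.toStr a) = false then H.insert (PySem.Int.toStr a) 1
      else H.modify (PySem.Int.toStr a) 0 (· + 1)) PySem.Dict.empty
  let _k := H.size   -- Python's 'k = len(H)' (unused afterwards)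
  let st := B.foldl (fun (st : PySem.Dict String Int × Int × Int) b =>
      let s := PySem.Int.toStr b
      if st.1.contains s && st.1.getD s 0 != 0 then
        (st.1.insert s (st.1.getD s 0 - 1), st.2.1 + 1, st.2.2)
      else (st.1, st.2.1, 1)) (H, 0, -1)
  st.2.1 + st.2.2

-- ===== PORT B =====
def beautifulPairs_alt (A : List Int) (B : List Int) : Int :=
  let ca : PySem.Dict String Int := A.foldl (fun d x =>
      d.insert (PySem.Int.toStr x) (d.getD (PySem.Int.toStr x) 0 + 1)) PySem.Dict.empty
  let cb : PySem.Dict String Int := B.foldl (fun d y =>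
      d.insert (PySem.Int.toStr y) (d.getD (PySem.Int.toStr y) 0 + 1)) PySem.Dict.empty
  let matchCount := (ca.items.map (fun p => min p.2 (cb.getD p.1 0))).sum
  if matchCount = (B.length : Int) then matchCount - 1 else matchCount + 1

-- ===== PRECONDITION & SPEC =====
def Spec_beautifulPairs (A : List Int) (B : List Int) (out : Int) : Prop := out = beautifulPairs_alt A B
instance (A : List Int) (B : List Int) (out : Int) : Decidable (Spec_beautifulPairs A B out) := by unfold Spec_beautifulPairs; infer_instance

-- ===== CLAIM (what is proved, stated in full; the proofs are below) =====
def Claim_equal_beautifulPairs : Prop := ∀ (A : List Int) (B : List Int), Dom_beautifulPairs A B → Spec_beautifulPairs A B (beautifulPairs A B)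

-- ===== LEMMAS AND PROOFS =====

-- greedy matching count of A's second loop, abstracted to counts h : String → Int
def pvGcount (h : String → Int) : List String → Int
  | [] => 0
  | b :: bs => if 0 < h b then 1 + pvGcount (fun k => if k = b then h b - 1 else h k) bs
               else pvGcount h bs

-- 'every element of bs matched' (A's to_add stays -1)
def pvOk (h : String → Int) : List String → Bool
  | [] => true
  | b :: bs => if 0 < h b then pvOk (fun k => if k = b then h b - 1 else h k) bs else false

-- both counting loops build counter (A.map toStr)
lemma build_eq_counter (A : List Int) :
    A.foldl (fun d x => d.insert (PySem.Int.toStr x) (d.getD (PySem.Int.toStr x) 0 + 1))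
      PySem.Dict.empty = PySem.Dict.counter (A.map PySem.Int.toStr) := by
  rw [← PySem.Dict.foldl_insert_getD_add_one_eq_counter, List.foldl_map]

lemma buildA_eq_counter (A : List Int) :
    A.foldl (fun H a =>
      if H.contains (PySem.Int.toStr a) = false then H.insert (PySem.Int.toStr a) 1
      else H.modify (PySem.Int.toStr a) 0 (· + 1)) PySem.Dict.empty
    = PySem.Dict.counter (A.map PySem.Int.toStr) := by
  rw [← build_eq_counter]
  congr 1
  funext d a
  by_cases hc : d.contains (PySem.Int.toStr a) = false
  · simp [hc, PySem.Dict.getD_of_not_contains d (0 : Int) hc]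
  · simp only [hc]
    simp [PySem.Dict.modify]

-- A's loop over B, with nonnegative counter values, computes pvGcount / pvOk
lemma loopA_spec (bs : List String) : ∀ (H : PySem.Dict String Int) (c t : Int),
    (∀ k, 0 ≤ H.getD k 0) →
    bs.foldl (fun (st : PySem.Dict String Int × Int × Int) s =>
      if st.1.contains s && st.1.getD s 0 != 0 then
        (st.1.insert s (st.1.getD s 0 - 1), st.2.1 + 1, st.2.2)
      else (st.1, st.2.1, 1)) (H, c, t)
    = ((bs.foldl (fun (st : PySem.Dict String Int × Int × Int) s =>
      if st.1.contains s && st.1.getD s 0 != 0 then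
        (st.1.insert s (st.1.getD s 0 - 1), st.2.1 + 1, st.2.2)
      else (st.1, st.2.1, 1)) (H, c, t)).1,
       c + pvGcount (fun k => H.getD k 0) bs,
       if pvOk (fun k => H.getD k 0) bs then t else 1) := by
  induction bs with
  | nil => intro H c t _; simp [pvGcount, pvOk]
  | cons b bs ih =>
    intro H c t hnn
    by_cases hb : 0 < H.getD b 0
    · have hcond : (H.contains b && H.getD b 0 != 0) = true := by
        have hc : H.contains b = true := by
          by_contra hcf
          have : H.contains b = false := by
            cases h : H.contains b
            · rfl
            · exact absurd h hcf
          rw [PySem.Dict.getD_of_not_contains H (0 : Int) this] at hb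
          omega
        simp [hc]
        omega
      have hupd : (fun k => (H.insert b (H.getD b 0 - 1)).getD k 0)
          = (fun k => if k = b then H.getD b 0 - 1 else H.getD k 0) := by
        funext k
        rw [PySem.Dict.getD_insert]
      have hnn' : ∀ k, 0 ≤ (H.insert b (H.getD b 0 - 1)).getD k 0 := by
        intro k
        rw [PySem.Dict.getD_insert]
        split
        · omega
        · exact hnn k
      simp only [List.foldl_cons, hcond, if_true]
      rw [ih _ _ _ hnn']
      simp only [pvGcount, pvOk, if_pos hb, hupd, add_assoc]
    · have h0 : H.getD b 0 = 0 := le_antisymm (by omega) (hnn b)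
      have hcond : (H.contains b && H.getD b 0 != 0) = false := by
        simp [h0]
      simp only [List.foldl_cons, hcond, Bool.false_eq_true, if_false]
      rw [ih _ _ _ hnn]
      simp [pvGcount, pvOk, hb]

-- splitting one term out of a sum over a nodup key list
lemma sum_map_single_diff (S : List String) (f g : String → Int) (b : String) :
    S.Nodup → b ∈ S → (∀ k ∈ S, k ≠ b → f k = g k) →
    (S.map f).sum = f b - g b + (S.map g).sum := by
  induction S with
  | nil => intro _ hb; cases hb
  | cons a S ih =>
    intro hnd hb hfg
    rcases List.mem_cons.mp hb with heq | hbS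
    · subst heq
      have hfg' : ∀ k ∈ S, f k = g k := by
        intro k hk
        have hkb : k ≠ b := by
          intro h
          exact (List.nodup_cons.mp hnd).1 (h ▸ hk)
        exact hfg k (List.mem_cons_of_mem _ hk) hkb
      simp only [List.map_cons, List.sum_cons, List.map_congr_left hfg']
      ring
    · have hab : a ≠ b := by
        intro h
        exact (List.nodup_cons.mp hnd).1 (h ▸ hbS)
      have ha : f a = g a := hfg a List.mem_cons_self hab
      have := ih (List.nodup_cons.mp hnd).2 hbS (fun k hk => hfg k (List.mem_cons_of_mem _ hk))
      simp only [List.map_cons, List.sum_cons, ha, this]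
      ring

-- the greedy count equals the sum of per-key minima over any nodup support list S
lemma gcount_eq_sum (bs : List String) : ∀ (h : String → Int) (S : List String),
    S.Nodup → (∀ k, 0 ≤ h k) → (∀ k, 0 < h k → k ∈ S) →
    pvGcount h bs = (S.map (fun k => min (h k) ((bs.count k : Nat) : Int))).sum := by
  induction bs with
  | nil =>
    intro h S _ hnn _
    simp only [pvGcount, List.count_nil]
    rw [List.map_congr_left (g := fun _ => (0 : Int)) (by intro k _; simp; exact hnn k)]
    simp
  | cons b bs ih =>
    intro h S hnd hnn hsupp
    by_cases hb : 0 < h b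
    · have hbS : b ∈ S := hsupp b hb
      set h' : String → Int := fun k => if k = b then h b - 1 else h k with hh'
      have hnn' : ∀ k, 0 ≤ h' k := by intro k; simp only [hh']; split <;> [omega; exact hnn k]
      have hsupp' : ∀ k, 0 < h' k → k ∈ S := by
        intro k hk
        simp only [hh'] at hk
        by_cases hkb : k = b
        · exact hkb ▸ hbS
        · exact hsupp k (by simpa [hkb] using hk)
      simp only [pvGcount, if_pos hb]
      rw [ih h' S hnd hnn' hsupp']
      rw [sum_map_single_diff S (fun k => min (h k) ((b :: bs).count k : Int))
            (fun k => min (h' k) ((bs.count k : Nat) : Int)) b hnd hbS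
            (by intro k _ hk; simp only [hh', if_neg hk, List.count_cons_of_ne (Ne.symm hk)])]
      have : ((b :: bs).count b : Int) = (bs.count b : Int) + 1 := by
        rw [List.count_cons_self]; push_cast; ring
      simp only [this, hh', if_pos rfl]
      omega
    · have h0 : h b = 0 := le_antisymm (by omega) (hnn b)
      simp only [pvGcount, if_neg hb]
      rw [ih h S hnd hnn hsupp]
      congr 1
      apply List.map_congr_left
      intro k _
      by_cases hkb : k = b
      · subst hkb
        rw [h0, List.count_cons_self]
        have : (0 : Int) ≤ (bs.count k : Int) := by positivity
        push_cast
        omega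
      · rw [List.count_cons_of_ne (Ne.symm hkb)]

lemma gcount_le_length (bs : List String) : ∀ h, pvGcount h bs ≤ (bs.length : Int) := by
  induction bs with
  | nil => intro h; simp [pvGcount]
  | cons b bs ih =>
    intro h
    simp only [pvGcount, List.length_cons]
    split
    · have := ih (fun k => if k = b then h b - 1 else h k); push_cast; omega
    · have := ih h; push_cast; omega

lemma ok_iff_gcount_eq_length (bs : List String) : ∀ h,
    pvOk h bs = true ↔ pvGcount h bs = (bs.length : Int) := by
  induction bs with
  | nil => intro h; simp [pvOk, pvGcount]
  | cons b bs ih =>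
    intro h
    simp only [pvOk, pvGcount, List.length_cons]
    split
    · rw [ih]
      push_cast
      omega
    · simp only [Bool.false_eq_true, false_iff]
      have := gcount_le_length bs h
      push_cast
      omega

-- ===== VERDICT (by name: the statement is the Claim_ definition above) =====
theorem beautifulPairs_spec : Claim_equal_beautifulPairs := by
  intro A B _
  simp only [Spec_beautifulPairs, beautifulPairs, beautifulPairs_alt]
  rw [buildA_eq_counter, build_eq_counter, build_eq_counter]
  set ka := A.map PySem.Int.toStr with hka
  set kb := B.map PySem.Int.toStr with hkb
  set h : String → Int := fun k => (PySem.Dict.counter ka).getD k 0 with hh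
  have hnn : ∀ k, 0 ≤ h k := by
    intro k
    simp only [hh, PySem.Dict.getD_counter]
    positivity
  have hfold :
      B.foldl (fun (st : PySem.Dict String Int × Int × Int) b =>
        if st.1.contains (PySem.Int.toStr b) && st.1.getD (PySem.Int.toStr b) 0 != 0 then
          (st.1.insert (PySem.Int.toStr b) (st.1.getD (PySem.Int.toStr b) 0 - 1), st.2.1 + 1, st.2.2)
        else (st.1, st.2.1, 1)) (PySem.Dict.counter ka, 0, -1)
      = kb.foldl (fun (st : PySem.Dict String Int × Int × Int) s =>
        if st.1.contains s && st.1.getD s 0 != 0 then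
          (st.1.insert s (st.1.getD s 0 - 1), st.2.1 + 1, st.2.2)
        else (st.1, st.2.1, 1)) (PySem.Dict.counter ka, 0, -1) := by
    rw [hkb, List.foldl_map]
  rw [hfold, loopA_spec kb (PySem.Dict.counter ka) 0 (-1) hnn]
  have hmatches : ((PySem.Dict.counter ka).items.map
        (fun p => min p.2 ((PySem.Dict.counter kb).getD p.1 0))).sum
      = pvGcount h kb := by
    rw [PySem.Dict.items_counter, List.map_map]
    rw [gcount_eq_sum kb h (PySem.Set.ofList ka) (PySem.Set.nodup_ofList ka) hnn
        (by intro k hk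
            simp only [hh, PySem.Dict.getD_counter] at hk
            rw [PySem.Set.mem_ofList]
            by_contra hmem
            rw [List.count_eq_zero_of_not_mem hmem] at hk
            simp at hk)]
    congr 1
    apply List.map_congr_left
    intro k _
    simp [hh, PySem.Dict.getD_counter]
  have hlen : (kb.length : Int) = (B.length : Int) := by simp [hkb]
  simp only [hmatches, ← hh, ← hlen]
  by_cases hok : pvOk h kb = true
  · have hg := (ok_iff_gcount_eq_length kb h).mp hok
    rw [hok, if_pos hg]
    simp only [reduceIte]
    omega
  · have hokf : pvOk h kb = false := by
      cases hx : pvOk h kb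
      · rfl
      · exact absurd hx hok
    have hne : pvGcount h kb ≠ (kb.length : Int) := fun hc =>
      hok ((ok_iff_gcount_eq_length kb h).mpr hc)
    rw [hokf, if_neg hne]
    norm_num
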